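-- pv_equiv track=rewrite | github.com/travisgk/german-to-ipa | german2ipa/_remove_hyphens.py | remove_hyphens
-- ===== SOURCE A (Python) =====
-- def remove_hyphens(german_text: str, replacement: str = ""):
--     HYPHEN_CHAR = "+"
--     hyphen_indices = []
--     hyphen_word_indices = []
--     inside_html = False
--
--     i = 0
--     while i < len(german_text):
--         if i == 0 or i >= len(german_text) - 3:
--             i += 1
--             continue
--
--         c = german_text[i]
--
--         if not inside_html and german_text[i : i + 20].startswith("<span"):
--             i += len("<span")
--             inside_html = True
--             continue
--         elif inside_html and german_text[i] == ">":
--             i += 1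
--             inside_html = False
--             continue
--
--         if not inside_html:
--             prev_c = german_text[i - 1]
--             current_c = german_text[i]
--             next_c = german_text[i + 1]
--
--             if prev_c.isalpha() and current_c == HYPHEN_CHAR and next_c.isalpha():
--                 hyphen_indices.append(i)
--
--         i += 1
--
--     de_words = german_text.split()  # split once, outside the loop
--     for index in hyphen_indices:
--         char_count = 0
--         for i, word in enumerate(de_words):
--             char_count += len(word)
--             if char_count > index:
--                 # append the word index (0-based). add +1 for 1-based.
--                 hyphen_word_indices.append(i)  # or append(i+1) if you want 1-based
--                 break
--             char_count += 1  # account for the single space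
--
--     for i in sorted(hyphen_indices, reverse=True):
--         german_text = (
--             german_text[:i]
--             + replacement
--             + (
--                 german_text[i + 1].upper()
--                 if len(replacement) > 0
--                 else german_text[i + 1]
--             )
--             + german_text[i + 2 :]
--         )
--
--     return german_text, hyphen_word_indices
-- ===== SOURCE B (Python) =====
-- def remove_hyphens(german_text: str, replacement: str = ""):
--     n = len(german_text)
--
--     # one scan over positions 1 .. n-4 collecting '+'-hyphen positions
--     idxs = []
--     inside = False
--     i = 1
--     while i < n - 3:
--         if not inside and german_text[i : i + 5] == "<span":
--             inside = True
--             i += 5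
--         elif inside:
--             if german_text[i] == ">":
--                 inside = False
--             i += 1
--         else:
--             if (
--                 german_text[i] == "+"
--                 and german_text[i - 1].isalpha()
--                 and german_text[i + 1].isalpha()
--             ):
--                 idxs.append(i)
--             i += 1
--
--     # word-boundary prefix sums built once, then a single merging (two-pointer) pass
--     thresholds = []
--     acc = 0
--     for w in german_text.split():
--         acc += len(w)
--         thresholds.append(acc)
--         acc += 1
--     word_idxs = []
--     j = 0
--     for idx in idxs:
--         while j < len(thresholds) and thresholds[j] <= idx:
--             j += 1
--         if j < len(thresholds):
--             word_idxs.append(j)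
--
--     # single forward rebuild of the string
--     parts = []
--     last = 0
--     for idx in idxs:
--         parts.append(german_text[last:idx])
--         parts.append(replacement)
--         nxt = german_text[idx + 1]
--         parts.append(nxt.upper() if replacement else nxt)
--         last = idx + 2
--     parts.append(german_text[last:])
--     return "".join(parts), word_idxs
-- ===== Notes on version B (the rewrite author's own statement) =====
-- stated objective: faster
-- what changed: The per-hyphen restart over the word list is replaced by word-length prefix sums consumed in one two-pointer pass, and the repeated back-to-front slice-and-concatenate string surgery is replaced by a single forward rebuild from segments.
import Mathlib
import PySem

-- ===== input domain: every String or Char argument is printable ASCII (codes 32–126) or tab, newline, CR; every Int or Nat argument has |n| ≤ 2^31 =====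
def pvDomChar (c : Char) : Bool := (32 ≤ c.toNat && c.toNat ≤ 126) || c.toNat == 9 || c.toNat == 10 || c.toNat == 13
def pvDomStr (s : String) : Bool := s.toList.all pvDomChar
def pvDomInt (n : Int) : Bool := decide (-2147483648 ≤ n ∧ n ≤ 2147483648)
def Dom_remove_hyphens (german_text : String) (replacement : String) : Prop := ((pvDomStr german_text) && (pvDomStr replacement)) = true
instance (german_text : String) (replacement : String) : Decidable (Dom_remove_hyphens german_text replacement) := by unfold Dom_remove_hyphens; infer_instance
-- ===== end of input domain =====

-- B replaces A's per-hyphen rescan of the word list by prefix sums consumed by one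
-- two-pointer pass, and A's repeated back-to-front slice surgery by a single forward
-- rebuild of the string (objective: faster, constant-factor/asymptotic on many hyphens).

-- ===== PORT A =====

-- the while-loop collecting hyphen positions (i, inside_html, hyphen_indices are the loop state)
def scanA (s : List Char) (i : Nat) (inside : Bool) (acc : List Nat) : List Nat :=
  if h : i < s.length then
    if i = 0 ∨ s.length - 3 ≤ i then
      scanA s (i + 1) inside acc
    else if !inside && PySem.Chars.startswith (PySem.List.slice s (some (i : Int)) (some ((i : Int) + 20))) ['<', 's', 'p', 'a', 'n'] then
      scanA s (i + 5) true acc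
    else if inside && (PySem.List.pyGetD s (i : Int) ' ' == '>') then
      scanA s (i + 1) false acc
    else if !inside then
      -- (Python also binds c = german_text[i], which is never used)
      if PySem.Chars.isalpha (PySem.List.pyGetD s ((i : Int) - 1) ' ') &&
          (PySem.List.pyGetD s (i : Int) ' ' == '+') &&
          PySem.Chars.isalpha (PySem.List.pyGetD s ((i : Int) + 1) ' ') then
        scanA s (i + 1) inside (acc ++ [i])
      else
        scanA s (i + 1) inside acc
    else
      scanA s (i + 1) inside acc
  else acc
  termination_by s.length - i
  decreasing_by all_goals omega

-- the inner 'for i, word in enumerate(de_words)' loop with char_count, returning the word index at the break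
def findWordA (words : List (List Char)) (idx : Nat) (cc : Nat) (k : Nat) : Option Nat :=
  match words with
  | [] => none
  | w :: ws =>
      if idx < cc + w.length then some k
      else findWordA ws idx (cc + w.length + 1) (k + 1)

-- one step of the final 'for i in sorted(hyphen_indices, reverse=True)' loop
def editA (repl : List Char) (t : List Char) (i : Nat) : List Char :=
  PySem.List.slice t none (some (i : Int)) ++ repl ++
    (if repl.length > 0 then [PySem.Chars.upperChar (PySem.List.pyGetD t ((i : Int) + 1) ' ')]
     else [PySem.List.pyGetD t ((i : Int) + 1) ' ']) ++
    PySem.List.slice t (some ((i : Int) + 2)) none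

def remove_hyphens (german_text : String) (replacement : String) : String × List Int :=
  let s := german_text.toList
  let repl := replacement.toList
  let hyphen_indices := scanA s 0 false []
  let de_words := PySem.Chars.split₀ s
  let hyphen_word_indices : List Int :=
    hyphen_indices.foldl
      (fun acc idx =>
        match findWordA de_words idx 0 0 with
        | some k => acc ++ [(k : Int)]
        | none => acc) []
  let final := (PySem.List.sorted hyphen_indices (fun x => x) true).foldl (editA repl) s
  (String.ofList final, hyphen_word_indices)

-- ===== PORT B =====

-- B's scan: runs over 1 .. n-4 directly, comparing the 5-char slice
def scanB (s : List Char) (i : Nat) (inside : Bool) (acc : List Nat) : List Nat :=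
  if h : i < s.length - 3 then
    if !inside && (PySem.List.slice s (some (i : Int)) (some ((i : Int) + 5)) == ['<', 's', 'p', 'a', 'n']) then
      scanB s (i + 5) true acc
    else if inside then
      scanB s (i + 1) (if PySem.List.pyGetD s (i : Int) ' ' == '>' then false else true) acc
    else if (PySem.List.pyGetD s (i : Int) ' ' == '+') &&
        PySem.Chars.isalpha (PySem.List.pyGetD s ((i : Int) - 1) ' ') &&
        PySem.Chars.isalpha (PySem.List.pyGetD s ((i : Int) + 1) ' ') then
      scanB s (i + 1) inside (acc ++ [i])
    else
      scanB s (i + 1) inside acc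
  else acc
  termination_by s.length - i
  decreasing_by all_goals omega

-- the 'while j < len(thresholds) and thresholds[j] <= idx: j += 1' loop
def advanceB (th : List Nat) (idx : Nat) (j : Nat) : Nat :=
  if h : j < th.length then
    if th.getD j 0 ≤ idx then advanceB th idx (j + 1) else j
  else j
  termination_by th.length - j
  decreasing_by omega

-- the 'for idx in idxs: parts.append(...)' forward rebuild
def rebuildB (s : List Char) (repl : List Char) (last : Nat) : List Nat → List Char
  | [] => PySem.List.slice s (some (last : Int)) none
  | idx :: rest =>
      PySem.List.slice s (some (last : Int)) (some (idx : Int)) ++ repl ++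
        (if repl.length > 0 then [PySem.Chars.upperChar (PySem.List.pyGetD s ((idx : Int) + 1) ' ')]
         else [PySem.List.pyGetD s ((idx : Int) + 1) ' ']) ++
        rebuildB s repl (idx + 2) rest

def remove_hyphens_alt (german_text : String) (replacement : String) : String × List Int :=
  let s := german_text.toList
  let repl := replacement.toList
  let idxs := scanB s 1 false []
  let th := ((PySem.Chars.split₀ s).foldl
    (fun (st : List Nat × Nat) w => (st.1 ++ [st.2 + w.length], st.2 + w.length + 1)) ([], 0)).1
  let word_idxs : List Int :=
    (idxs.foldl
      (fun (st : List Int × Nat) idx =>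
        let j := advanceB th idx st.2
        ((if j < th.length then st.1 ++ [(j : Int)] else st.1), j)) ([], 0)).1
  (String.ofList (rebuildB s repl 0 idxs), word_idxs)

-- ===== PRECONDITION & SPEC =====
def Spec_remove_hyphens (german_text : String) (replacement : String) (out : String × List Int) : Prop := out = remove_hyphens_alt german_text replacement
instance (german_text : String) (replacement : String) (out : String × List Int) : Decidable (Spec_remove_hyphens german_text replacement out) := by unfold Spec_remove_hyphens; infer_instance

-- ===== CLAIM (what is proved, stated in full; the proofs are below) =====
def Claim_equal_remove_hyphens : Prop := ∀ (german_text : String) (replacement : String), Dom_remove_hyphens german_text replacement → Spec_remove_hyphens german_text replacement (remove_hyphens german_text replacement)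

-- ===== LEMMAS AND PROOFS =====

theorem scanA_stop (s : List Char) (i : Nat) (b : Bool) (acc : List Nat)
    (h : ¬ i < s.length) : scanA s i b acc = acc := by
  rw [scanA]; exact dif_neg h

theorem scanB_stop (s : List Char) (i : Nat) (b : Bool) (acc : List Nat)
    (h : ¬ i < s.length - 3) : scanB s i b acc = acc := by
  rw [scanB]; exact dif_neg h

theorem pyGetD_int_sub_one (s : List Char) (i : Nat) (c : Char) (h : 1 ≤ i) :
    PySem.List.pyGetD s ((i : Int) - 1) c = s.getD (i - 1) c := by
  rw [show ((i : Int) - 1) = ((i - 1 : Nat) : Int) by omega]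
  simp [List.getD]

theorem pyGetD_int_add_one (s : List Char) (i : Nat) (c : Char) :
    PySem.List.pyGetD s ((i : Int) + 1) c = s.getD (i + 1) c := by
  rw [show ((i : Int) + 1) = ((i + 1 : Nat) : Int) by push_cast; ring,
      PySem.List.pyGetD_natCast]

-- the "<span" tests of the two scans agree
theorem spanCond (s : List Char) (i : Nat) :
    PySem.Chars.startswith (PySem.List.slice s (some (i : Int)) (some ((i : Int) + 20))) ['<', 's', 'p', 'a', 'n']
      = (PySem.List.slice s (some (i : Int)) (some ((i : Int) + 5)) == ['<', 's', 'p', 'a', 'n']) := by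
  rw [show ((i : Int) + 20) = ((i + 20 : Nat) : Int) by push_cast; ring,
      show ((i : Int) + 5) = ((i + 5 : Nat) : Int) by push_cast; ring,
      PySem.List.slice_natCast, PySem.List.slice_natCast]
  have h20 : i + 20 - i = 20 := by omega
  have h5 : i + 5 - i = 5 := by omega
  rw [h20, h5]
  have : PySem.Chars.startswith ((s.drop i).take 20) ['<', 's', 'p', 'a', 'n'] = true
      ↔ ((s.drop i).take 5 == ['<', 's', 'p', 'a', 'n']) = true := by
    rw [PySem.Chars.startswith_iff, beq_iff_eq]
    rw [List.prefix_take_iff]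
    constructor
    · rintro ⟨hp, -⟩
      have := List.prefix_iff_eq_take.mp hp
      simpa using this.symm
    · intro h
      refine ⟨List.prefix_iff_eq_take.mpr (by simpa using h.symm), by simp⟩
  by_cases hb : ((s.drop i).take 5 == ['<', 's', 'p', 'a', 'n']) = true
  · rw [hb, this.mpr hb]
  · rw [Bool.eq_false_iff.mpr (fun hc => hb (this.mp hc)),
        (Bool.eq_false_iff.mpr hb)]

theorem scanA_high (s : List Char) :
    ∀ n i b acc, s.length - i ≤ n → 1 ≤ i → s.length - 3 ≤ i → scanA s i b acc = acc := by
  intro n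
  induction n with
  | zero =>
      intro i b acc h1 h2 h3
      exact scanA_stop s i b acc (by omega)
  | succ n ih =>
      intro i b acc h1 h2 h3
      by_cases hi : i < s.length
      · rw [scanA]
        rw [dif_pos hi, if_pos (Or.inr h3)]
        exact ih (i + 1) b acc (by omega) (by omega) (by omega)
      · exact scanA_stop s i b acc hi

theorem scanA_eq_scanB (s : List Char) :
    ∀ n i b acc, s.length - i ≤ n → 1 ≤ i → scanA s i b acc = scanB s i b acc := by
  intro n
  induction n with
  | zero =>
      intro i b acc h1 h2
      rw [scanA_stop s i b acc (by omega), scanB_stop s i b acc (by omega)]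
  | succ n ih =>
      intro i b acc h1 h2
      by_cases hlt : i < s.length - 3
      · rw [scanA, scanB]
        rw [dif_pos (by omega : i < s.length), dif_pos hlt,
            if_neg (by omega : ¬ (i = 0 ∨ s.length - 3 ≤ i))]
        cases b with
        | false =>
            simp only [Bool.not_false, Bool.true_and]
            rw [spanCond]
            by_cases hspan : (PySem.List.slice s (some (i : Int)) (some ((i : Int) + 5)) == ['<', 's', 'p', 'a', 'n']) = true
            · rw [if_pos hspan, if_pos hspan]
              exact ih (i + 5) true acc (by omega) (by omega)
            · rw [if_neg hspan, if_neg hspan]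
              simp only [Bool.false_and, if_neg (by simp : ¬ (false = true))]
              rw [if_pos (by trivial)]
              rw [Bool.and_comm (PySem.Chars.isalpha (PySem.List.pyGetD s ((i : Int) - 1) ' '))
                (PySem.List.pyGetD s (i : Int) ' ' == '+')]
              by_cases hc : ((PySem.List.pyGetD s (i : Int) ' ' == '+') &&
                  PySem.Chars.isalpha (PySem.List.pyGetD s ((i : Int) - 1) ' ') &&
                  PySem.Chars.isalpha (PySem.List.pyGetD s ((i : Int) + 1) ' ')) = true
              · rw [if_pos hc, if_pos hc]
                exact ih (i + 1) false (acc ++ [i]) (by omega) (by omega)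
              · rw [if_neg hc, if_neg hc]
                exact ih (i + 1) false acc (by omega) (by omega)
        | true =>
            simp only [Bool.not_true, Bool.false_and,
              if_neg (by simp : ¬ (false = true)), Bool.true_and]
            rw [if_pos (show True from trivial)]
            by_cases hgt : (PySem.List.pyGetD s (i : Int) ' ' == '>') = true
            · rw [if_pos hgt, if_pos hgt]
              exact ih (i + 1) false acc (by omega) (by omega)
            · rw [if_neg hgt, if_neg hgt]
              exact ih (i + 1) true acc (by omega) (by omega)
      · rw [scanB_stop s i b acc hlt]
        by_cases hi : i < s.length
        · exact scanA_high s (s.length - i) i b acc (by omega) h2 (by omega)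
        · exact scanA_stop s i b acc hi

theorem scanA_zero_eq (s : List Char) (b : Bool) (acc : List Nat) :
    scanA s 0 b acc = scanB s 1 b acc := by
  by_cases hi : 0 < s.length
  · rw [scanA]
    rw [dif_pos hi, if_pos (Or.inl rfl)]
    exact scanA_eq_scanB s (s.length - 1) 1 b acc (by omega) (by omega)
  · rw [scanA_stop s 0 b acc (by omega), scanB_stop s 1 b acc (by omega)]

-- accumulator lemma for scanB
theorem scanB_acc (s : List Char) :
    ∀ n i b acc, s.length - i ≤ n → scanB s i b acc = acc ++ scanB s i b [] := by
  intro n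
  induction n with
  | zero =>
      intro i b acc h1
      rw [scanB_stop s i b acc (by omega), scanB_stop s i b [] (by omega)]
      simp
  | succ n ih =>
      intro i b acc h1
      by_cases hlt : i < s.length - 3
      · conv_lhs => rw [scanB]
        conv_rhs => rw [scanB]
        rw [dif_pos hlt, dif_pos hlt]
        split_ifs with h1' h2' h3' h4'
        · exact ih (i + 5) true acc (by omega)
        · exact ih (i + 1) false acc (by omega)
        · exact ih (i + 1) true acc (by omega)
        · rw [ih (i + 1) b (acc ++ [i]) (by omega), ih (i + 1) b ([] ++ [i]) (by omega)]
          simp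
        · exact ih (i + 1) b acc (by omega)
      · rw [scanB_stop s i b acc hlt, scanB_stop s i b [] hlt]
        simp
  
-- every hyphen position found by the scan actually looks like "letter + letter" strictly inside the string
theorem scanB_props (s : List Char) :
    ∀ n i b, s.length - i ≤ n → 1 ≤ i →
      (∀ j ∈ scanB s i b [], i ≤ j ∧ j + 3 < s.length ∧ s.getD j ' ' = '+' ∧
        PySem.Chars.isalpha (s.getD (j - 1) ' ') = true ∧
        PySem.Chars.isalpha (s.getD (j + 1) ' ') = true) ∧
      (scanB s i b []).Pairwise (· < ·) := by
  intro n
  induction n with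
  | zero =>
      intro i b h1 h2
      rw [scanB_stop s i b [] (by omega)]
      exact ⟨by simp, by simp⟩
  | succ n ih =>
      intro i b h1 h2
      by_cases hlt : i < s.length - 3
      · rw [scanB, dif_pos hlt]
        split_ifs with h1' h2' h3' h4'
        · have := ih (i + 5) true (by omega) (by omega)
          exact ⟨fun j hj => by
            have := this.1 j hj
            exact ⟨by omega, this.2.1, this.2.2.1, this.2.2.2.1, this.2.2.2.2⟩, this.2⟩
        · have := ih (i + 1) false (by omega) (by omega)
          exact ⟨fun j hj => by
            have := this.1 j hj
            exact ⟨by omega, this.2.1, this.2.2.1, this.2.2.2.1, this.2.2.2.2⟩, this.2⟩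
        · have := ih (i + 1) true (by omega) (by omega)
          exact ⟨fun j hj => by
            have := this.1 j hj
            exact ⟨by omega, this.2.1, this.2.2.1, this.2.2.2.1, this.2.2.2.2⟩, this.2⟩
        · simp only [List.nil_append]
          rw [scanB_acc s (s.length - (i + 1)) (i + 1) b [i] (by omega)]
          have hard := ih (i + 1) b (by omega) (by omega)
          have hc := (Bool.and_eq_true _ _).mp h4'
          have hc1 := (Bool.and_eq_true _ _).mp hc.1
          have hcur : s.getD i ' ' = '+' := by
            have h := beq_iff_eq.mp hc1.1
            simpa [List.getD] using h
          have hprev : PySem.Chars.isalpha (s.getD (i - 1) ' ') = true := by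
            have h := hc1.2
            rwa [pyGetD_int_sub_one s i ' ' h2] at h
          have hnxt : PySem.Chars.isalpha (s.getD (i + 1) ' ') = true := by
            have h := hc.2
            rwa [pyGetD_int_add_one s i ' '] at h
          constructor
          · intro j hj
            simp only [List.singleton_append, List.mem_cons] at hj
            rcases hj with rfl | hj
            · exact ⟨le_refl _, by omega, hcur, hprev, hnxt⟩
            · have := hard.1 j hj
              exact ⟨by omega, this.2.1, this.2.2.1, this.2.2.2.1, this.2.2.2.2⟩
          · simp only [List.singleton_append]
            refine List.Pairwise.cons ?_ hard.2
            intro j hj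
            have := hard.1 j hj
            omega
        · have := ih (i + 1) b (by omega) (by omega)
          exact ⟨fun j hj => by
            have := this.1 j hj
            exact ⟨by omega, this.2.1, this.2.2.1, this.2.2.2.1, this.2.2.2.2⟩, this.2⟩
      · rw [scanB_stop s i b [] hlt]
        exact ⟨by simp, by simp⟩

-- consecutive hyphen positions are at least 2 apart ('+' is not a letter)
theorem scanB_gap (s : List Char) :
    (scanB s 1 false []).Pairwise (fun a b => a + 2 ≤ b) := by
  have h := scanB_props s s.length 1 false (by omega) (by omega)
  refine h.2.imp_of_mem ?_
  intro a b ha hb hlt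
  have pa := h.1 a ha
  have pb := h.1 b hb
  by_contra hc
  have hba : b - 1 = a := by omega
  have : PySem.Chars.isalpha (s.getD a ' ') = true := by
    have := pb.2.2.2.1
    rwa [hba] at this
  rw [pa.2.2.1] at this
  exact absurd this (by decide)

-- descending sort of a strictly increasing list is its reverse
theorem sorted_rev_of_pairwise_lt :
    ∀ xs : List Nat, xs.Pairwise (· < ·) →
      PySem.List.sorted xs (fun x => x) true = xs.reverse := by
  have hrfl : ∀ xs : List Nat, PySem.List.sorted xs (fun x => x) true
      = xs.foldl (fun acc x => PySem.List.insertBy (fun a b => decide (b < a)) x acc) [] :=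
    fun xs => rfl
  intro xs
  induction xs using List.reverseRecOn with
  | nil => intro _; rfl
  | append_singleton ys x ih =>
      intro h
      obtain ⟨hys, -, hcross⟩ := List.pairwise_append.mp h
      have hall : ∀ y ∈ ys, y < x := fun y hy => hcross y hy x (by simp)
      rw [hrfl, List.foldl_append, ← hrfl _, ih hys]
      simp only [List.foldl_cons, List.foldl_nil, List.reverse_append, List.reverse_singleton,
        List.singleton_append]
      cases hys' : ys.reverse with
      | nil => rfl
      | cons z zs =>
          have hz : z ∈ ys := by
            have : z ∈ ys.reverse := by rw [hys']; simp
            simpa using this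
          show PySem.List.insertBy _ x (z :: zs) = x :: z :: zs
          rw [show PySem.List.insertBy (fun a b => decide (b < a)) x (z :: zs)
              = if decide (z < x) then x :: z :: zs else z :: PySem.List.insertBy (fun a b => decide (b < a)) x zs from rfl]
          rw [if_pos (by simpa using hall z hz)]

-- characterization: findWordA is "first prefix-sum threshold exceeding idx"
def thAux : List (List Char) → Nat → List Nat
  | [], _ => []
  | w :: ws, a => (a + w.length) :: thAux ws (a + w.length + 1)

theorem thresholds_eq (ws : List (List Char)) :
    ∀ acc a, (ws.foldl (fun (st : List Nat × Nat) w => (st.1 ++ [st.2 + w.length], st.2 + w.length + 1)) (acc, a)).1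
      = acc ++ thAux ws a := by
  induction ws with
  | nil => intro acc a; simp [thAux]
  | cons w ws ih =>
      intro acc a
      simp only [List.foldl_cons, thAux]
      rw [ih]
      simp

theorem findWordA_eq (idx : Nat) :
    ∀ ws cc k, findWordA ws idx cc k =
      (if List.findIdx (fun t => decide (idx < t)) (thAux ws cc) < (thAux ws cc).length
       then some (List.findIdx (fun t => decide (idx < t)) (thAux ws cc) + k) else none) := by
  intro ws
  induction ws with
  | nil => intro cc k; simp [findWordA, thAux]
  | cons w ws ih =>
      intro cc k
      simp only [findWordA, thAux, List.findIdx_cons, List.length_cons]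
      by_cases hlt : idx < cc + w.length
      · rw [if_pos hlt]
        simp [hlt]
      · rw [if_neg hlt, ih (cc + w.length + 1) (k + 1)]
        simp only [show (decide (idx < cc + w.length)) = false by simpa using hlt, cond_false]
        by_cases hf : List.findIdx (fun t => decide (idx < t)) (thAux ws (cc + w.length + 1)) < (thAux ws (cc + w.length + 1)).length
        · rw [if_pos hf, if_pos (by omega)]
          congr 1
          omega
        · rw [if_neg hf, if_neg (by omega)]

theorem advanceB_eq (th : List Nat) (idx : Nat) :
    ∀ n j, th.length - j ≤ n →
      advanceB th idx j = j + List.findIdx (fun t => decide (idx < t)) (th.drop j) := by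
  intro n
  induction n with
  | zero =>
      intro j h1
      rw [advanceB, dif_neg (by omega : ¬ j < th.length)]
      rw [List.drop_eq_nil_of_le (by omega), List.findIdx_nil]
      omega
  | succ n ih =>
      intro j h1
      by_cases hj : j < th.length
      · rw [advanceB, dif_pos hj]
        rw [List.drop_eq_getElem_cons hj, List.findIdx_cons]
        by_cases hle : th.getD j 0 ≤ idx
        · rw [if_pos hle, ih (j + 1) (by omega)]
          have : (decide (idx < th[j])) = false := by
            simp only [decide_eq_false_iff_not, not_lt]
            rwa [List.getD_eq_getElem th 0 hj] at hle
          rw [this]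
          simp only [cond_false]
          omega
        · rw [if_neg hle]
          have : (decide (idx < th[j])) = true := by
            simp only [decide_eq_true_eq]
            rw [List.getD_eq_getElem th 0 hj] at hle
            omega
          rw [this]
          simp
      · rw [advanceB, dif_neg hj]
        rw [List.drop_eq_nil_of_le (by omega), List.findIdx_nil]
        omega

theorem findIdx_shift (p : Nat → Bool) :
    ∀ (th : List Nat) (j : Nat), j ≤ th.length →
      (∀ m, m < j → p (th.getD m 0) = false) →
      List.findIdx p th = j + List.findIdx p (th.drop j) := by
  intro th
  induction th with
  | nil =>
      intro j hj _
      have : j = 0 := by simpa using hj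
      subst this
      simp
  | cons x xs ih =>
      intro j hj hfail
      cases j with
      | zero => simp
      | succ k =>
          have hx : p x = false := by
            have := hfail 0 (by omega)
            simpa using this
          rw [List.findIdx_cons, hx]
          simp only [cond_false, List.drop_succ_cons]
          rw [ih k (by simpa using hj) (fun m hm => by
            have := hfail (m + 1) (by omega)
            simpa using this)]
          omega

theorem not_p_of_lt_findIdx (p : Nat → Bool) :
    ∀ (l : List Nat) m, m < List.findIdx p l → p (l.getD m 0) = false := by
  intro l
  induction l with
  | nil => intro m hm; simp at hm
  | cons x xs ih =>
      intro m hlt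
      rw [List.findIdx_cons] at hlt
      by_cases hx : p x = true
      · rw [hx] at hlt; simp at hlt
      · have hx' : p x = false := by simpa using hx
        rw [hx'] at hlt
        simp only [cond_false] at hlt
        cases m with
        | zero => simpa using hx'
        | succ m' =>
            have := ih m' (by omega)
            simpa using this

-- the two-pointer merge equals A's per-index restart over the word list
theorem twoPointer (words : List (List Char)) (th : List Nat) (hth : th = thAux words 0) :
    ∀ (idxs : List Nat) (out : List Int) (j c : Nat),
      idxs.Pairwise (· ≤ ·) → (∀ x ∈ idxs, c ≤ x) →
      j ≤ th.length → (∀ m, m < j → th.getD m 0 ≤ c) →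
      (idxs.foldl
        (fun (st : List Int × Nat) idx =>
          let j := advanceB th idx st.2
          ((if j < th.length then st.1 ++ [(j : Int)] else st.1), j)) (out, j)).1
      = idxs.foldl
          (fun acc idx =>
            match findWordA words idx 0 0 with
            | some k => acc ++ [(k : Int)]
            | none => acc) out := by
  intro idxs
  induction idxs with
  | nil => intro out j c _ _ _ _; rfl
  | cons idx rest ih =>
      intro out j c hpw hc hjle hinv
      have hcidx : c ≤ idx := hc idx (by simp)
      have hadv : advanceB th idx j = j + List.findIdx (fun t => decide (idx < t)) (th.drop j) :=
        advanceB_eq th idx th.length j (by omega)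
      have hshift : List.findIdx (fun t => decide (idx < t)) th
          = j + List.findIdx (fun t => decide (idx < t)) (th.drop j) := by
        apply findIdx_shift _ th j hjle
        intro m hm
        have := hinv m hm
        simp only [decide_eq_false_iff_not, not_lt]
        omega
      have hj' : advanceB th idx j = List.findIdx (fun t => decide (idx < t)) th := by
        rw [hadv, hshift]
      have hfw : findWordA words idx 0 0 =
          (if List.findIdx (fun t => decide (idx < t)) th < th.length
           then some (List.findIdx (fun t => decide (idx < t)) th) else none) := by
        rw [hth, findWordA_eq idx words 0 0]
        simp
      simp only [List.foldl_cons]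
      rw [ih _ _ idx (hpw.sublist (List.sublist_cons_self idx rest))
        (fun x hx => List.rel_of_pairwise_cons hpw hx)
        (by rw [hj']; have := List.findIdx_le_length (p := fun t => decide (idx < t)) (xs := th); omega)
        (by
          intro m hm
          rw [hj'] at hm
          have := not_p_of_lt_findIdx (fun t => decide (idx < t)) th m hm
          simp only [decide_eq_false_iff_not, not_lt] at this
          exact this)]
      congr 1
      rw [hfw, hj']
      split_ifs with h
      · rfl
      · rfl

-- the reversed-order slice surgery equals the single forward rebuild
theorem editFold_eq_rebuild (s repl : List Char) :
    ∀ (idxs : List Nat) (last : Nat),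
      idxs.Pairwise (fun a b => a + 2 ≤ b) →
      (∀ j ∈ idxs, last ≤ j ∧ j + 3 < s.length) →
      idxs.foldr (fun i t => editA repl t i) s = s.take last ++ rebuildB s repl last idxs := by
  intro idxs
  induction idxs with
  | nil =>
      intro last _ _
      simp [rebuildB, PySem.List.slice_from_natCast]
  | cons i rest ih =>
      intro last hpw hb
      have hi := hb i (by simp)
      have hrest : ∀ j ∈ rest, i + 2 ≤ j ∧ j + 3 < s.length := by
        intro j hj
        exact ⟨List.rel_of_pairwise_cons hpw hj, (hb j (by simp [hj])).2⟩
      have hIH := ih (i + 2) (hpw.sublist (List.sublist_cons_self i rest)) hrest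
      simp only [List.foldr_cons]
      rw [hIH]
      have hlen : (s.take (i + 2)).length = i + 2 := by
        rw [List.length_take]
        omega
      simp only [editA, rebuildB]
      rw [show ((i : Int) + 2) = ((i + 2 : Nat) : Int) by push_cast; ring]
      rw [PySem.List.slice_to_natCast, PySem.List.slice_from_natCast]
      rw [List.take_append_of_le_length (by omega)]
      rw [List.take_take, min_eq_left (by omega)]
      rw [List.drop_left' hlen]
      rw [pyGetD_int_add_one]
      have hget : (s.take (i + 2) ++ rebuildB s repl (i + 2) rest).getD (i + 1) ' ' = s.getD (i + 1) ' ' := by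
        rw [List.getD_append _ _ _ _ (by omega)]
        simp only [List.getD]
        rw [List.getElem?_take_of_lt (by omega)]
      rw [hget]
      rw [PySem.List.slice_natCast, pyGetD_int_add_one]
      rw [show s.take i = s.take last ++ (s.drop last).take (i - last) by
        rw [← List.take_add]
        congr 1
        omega]
      simp [List.append_assoc]

-- combine everything
theorem remove_hyphens_eq (german_text replacement : String) :
    remove_hyphens german_text replacement = remove_hyphens_alt german_text replacement := by
  have hscan : scanA german_text.toList 0 false [] = scanB german_text.toList 1 false [] :=
    scanA_zero_eq _ _ _
  have hprops := scanB_props german_text.toList german_text.toList.length 1 false (by omega) (by omega)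
  have hgap := scanB_gap german_text.toList
  have hth : ((PySem.Chars.split₀ german_text.toList).foldl
      (fun (st : List Nat × Nat) w => (st.1 ++ [st.2 + w.length], st.2 + w.length + 1)) ([], 0)).1
      = thAux (PySem.Chars.split₀ german_text.toList) 0 := by
    rw [thresholds_eq]
    simp
  simp only [remove_hyphens, remove_hyphens_alt]
  refine Prod.ext ?_ ?_
  · -- strings
    simp only [hscan]
    congr 1
    rw [sorted_rev_of_pairwise_lt _ hprops.2, List.foldl_reverse]
    rw [editFold_eq_rebuild german_text.toList replacement.toList _ 0 hgap
      (fun j hj => ⟨by omega, (hprops.1 j hj).2.1⟩)]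
    simp
  · -- word index lists
    simp only [hscan]
    rw [← twoPointer (PySem.Chars.split₀ german_text.toList) _ hth
      (scanB german_text.toList 1 false []) [] 0 0
      (hprops.2.imp (fun h => Nat.le_of_lt h))
      (fun x _ => Nat.zero_le x) (by omega) (by omega)]

-- ===== VERDICT (by name: the statement is the Claim_ definition above) =====
theorem remove_hyphens_spec : Claim_equal_remove_hyphens := by
  intro german_text replacement _
  unfold Spec_remove_hyphens
  exact remove_hyphens_eq german_text replacement
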